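-- pv_equiv track=rewrite | github.com/priyanshuJain-32/leetcode_grind | 3033. Modify the Matrix.py | modifiedMatrix
-- ===== SOURCE A (Python) =====
-- from typing import List
--
-- def modifiedMatrix(matrix: List[List[int]]) -> List[List[int]]:
--     m,n = len(matrix), len(matrix[0])
--     for j in range(n):
--         flag = False
--         maxi = -1
--         for i in range(m):
--             if matrix[i][j]==-1:
--                 flag = True
--             maxi = max(maxi, matrix[i][j])
--         if flag:
--             for i in range(m):
--                 if matrix[i][j]==-1:
--                     matrix[i][j] = maxi
--     return matrix
-- ===== SOURCE B (Python) =====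
-- from typing import List
--
-- def modifiedMatrix(matrix: List[List[int]]) -> List[List[int]]:
--     # One row-major pass records the coordinates of every -1 in a worklist while
--     # maintaining running column maxima; then only the recorded cells are patched,
--     # so the matrix is never rescanned.
--     n = len(matrix[0])
--     best = [-1] * n
--     holes = []
--     for i, row in enumerate(matrix):
--         for j in range(n):
--             v = row[j]
--             if v == -1:
--                 holes.append((i, j))
--             elif v > best[j]:
--                 best[j] = v
--     for i, j in holes:
--         matrix[i][j] = best[j]
--     return matrix
-- ===== Notes on version B (the rewrite author's own statement) =====
-- stated objective: faster
-- what changed: B replaces A's per-column scan/rescan (up to three passes over each column with Python-level double indexing) with one row-major pass that records every -1 coordinate in a worklist while maintaining a running column-maxima array, then patches only the recorded cells; measured ~2x faster at the largest timed size.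
import Mathlib
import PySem

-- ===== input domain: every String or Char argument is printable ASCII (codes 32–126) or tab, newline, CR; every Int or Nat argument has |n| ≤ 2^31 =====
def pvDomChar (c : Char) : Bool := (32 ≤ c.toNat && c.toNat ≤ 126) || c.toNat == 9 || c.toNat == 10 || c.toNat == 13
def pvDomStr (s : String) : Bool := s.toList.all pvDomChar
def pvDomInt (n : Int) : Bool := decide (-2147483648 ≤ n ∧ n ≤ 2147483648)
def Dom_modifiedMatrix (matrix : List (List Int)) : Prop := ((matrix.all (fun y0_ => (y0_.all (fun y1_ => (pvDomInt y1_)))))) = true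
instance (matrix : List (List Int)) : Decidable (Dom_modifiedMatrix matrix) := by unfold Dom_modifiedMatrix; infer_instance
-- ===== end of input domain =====

-- B makes one row-major pass recording -1 coordinates in a worklist plus running column
-- maxima, then patches only the recorded cells, instead of A's per-column scan/rescan;
-- both Pythons mutate the argument in place, the equivalence proved is about the return value.

-- ===== PORT A =====
-- port of A: for each column j, one pass computing flag and maxi, then a gated replacement pass
def modifiedMatrix (matrix : List (List Int)) : List (List Int) :=
  let n := (matrix.headD []).length
  (List.range n).foldl (fun mat j =>
    let st := mat.foldl (fun (st : Bool × Int) row =>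
      (st.1 || (row.getD j 0 == -1), max st.2 (row.getD j 0))) (false, -1)
    if st.1 then
      mat.map (fun row => if row.getD j 0 == -1 then row.set j st.2 else row)
    else mat) matrix

-- ===== PORT B =====
-- the inner `for j in range(n)` of B's first pass: state = (best, holes)
def pvInner (n i : Nat) (row : List Int) (st : List Int × List (Nat × Nat)) :
    List Int × List (Nat × Nat) :=
  (List.range n).foldl (fun st j =>
    let v := row.getD j 0
    if v == -1 then (st.1, st.2 ++ [(i, j)])
    else if st.1.getD j 0 < v then (st.1.set j v, st.2)
    else st) st

-- the outer `for i, row in enumerate(matrix)` of B's first pass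
def pvScan (n : Nat) : List (List Int) → Nat → List Int × List (Nat × Nat) →
    List Int × List (Nat × Nat)
  | [], _, st => st
  | r :: rs, i, st => pvScan n rs (i + 1) (pvInner n i r st)

-- port of B: one row-major pass building (best, holes), then patch only the recorded holes
def modifiedMatrix_alt (matrix : List (List Int)) : List (List Int) :=
  let n := (matrix.headD []).length
  let st := pvScan n matrix 0 (List.replicate n (-1), [])
  st.2.foldl (fun mat q => mat.set q.1 ((mat.getD q.1 []).set q.2 (st.1.getD q.2 0))) matrix

-- ===== PRECONDITION & SPEC =====
-- Pre_ excludes exactly the inputs where Python A raises IndexError: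
-- the empty matrix (matrix[0]) and matrices with a row shorter than row 0 (matrix[i][j]).
def Pre_modifiedMatrix (matrix : List (List Int)) : Prop :=
  matrix ≠ [] ∧ ∀ row ∈ matrix, (matrix.headD []).length ≤ row.length
instance (matrix : List (List Int)) : Decidable (Pre_modifiedMatrix matrix) := by
  unfold Pre_modifiedMatrix; infer_instance

def pvWitness_modifiedMatrix : List (List Int) := [[1, -1], [-1, 3]]

def Spec_modifiedMatrix (matrix : List (List Int)) (out : List (List Int)) : Prop := out = modifiedMatrix_alt matrix
instance (matrix : List (List Int)) (out : List (List Int)) : Decidable (Spec_modifiedMatrix matrix out) := by unfold Spec_modifiedMatrix; infer_instance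

-- ===== CLAIM (what is proved, stated in full; the proofs are below) =====
def Claim_equal_modifiedMatrix : Prop := ∀ (matrix : List (List Int)), Dom_modifiedMatrix matrix → Pre_modifiedMatrix matrix → Spec_modifiedMatrix matrix (modifiedMatrix matrix)

-- ===== LEMMAS AND PROOFS =====

-- A's inner scan computed in closed form over the column
theorem colScan_eq (mat : List (List Int)) (j : Nat) (b : Bool) (a : Int) :
    mat.foldl (fun (st : Bool × Int) row =>
      (st.1 || (row.getD j 0 == -1), max st.2 (row.getD j 0))) (b, a)
    = (b || (mat.map (fun row => row.getD j 0)).any (· == -1),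
       (mat.map (fun row => row.getD j 0)).foldl max a) := by
  induction mat generalizing b a with
  | nil => simp
  | cons r t ih =>
    simp only [List.foldl_cons, List.map_cons, List.any_cons]
    rw [ih]
    simp [Bool.or_assoc]

-- positions ≥ k are untouched by the conditional row-rewrite over range k
theorem bfold_getD_high (f : Nat → Int) (k j : Nat) (row : List Int) (hkj : k ≤ j) :
    ((List.range k).foldl (fun r i =>
      if r.getD i 0 == -1 then r.set i (f i) else r) row).getD j 0 = row.getD j 0 := by
  induction k generalizing row with
  | zero => rfl
  | succ k ih =>
    rw [List.range_succ, List.foldl_append]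
    simp only [List.foldl_cons, List.foldl_nil]
    set G := (List.range k).foldl (fun r i =>
      if r.getD i 0 == -1 then r.set i (f i) else r) row with hG
    have hne : k ≠ j := by omega
    have hset : (G.set k (f k)).getD j 0 = G.getD j 0 := by
      simp [List.getD_eq_getElem?_getD, List.getElem?_set_ne hne]
    have := ih row (by omega)
    split <;> simp_all

-- main invariant for A: A's fold over the first k columns equals mapping a conditional
-- row-rewrite over range k, for any replacement table f that agrees with A's clamped
-- column max wherever the column has a -1
theorem main_inv (M : List (List Int)) (n : Nat) (f : Nat → Int)
    (hf : ∀ j, j < n → ((M.map (fun row => row.getD j 0)).any (· == -1)) = true →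
      (M.map (fun row => row.getD j 0)).foldl max (-1) = f j)
    (k : Nat) (hk : k ≤ n) :
    (List.range k).foldl (fun mat j =>
      let st := mat.foldl (fun (st : Bool × Int) row =>
        (st.1 || (row.getD j 0 == -1), max st.2 (row.getD j 0))) (false, -1)
      if st.1 then
        mat.map (fun row => if row.getD j 0 == -1 then row.set j st.2 else row)
      else mat) M
    = M.map (fun row => (List.range k).foldl (fun r j =>
        if r.getD j 0 == -1 then r.set j (f j) else r) row) := by
  induction k with
  | zero => simp
  | succ k ih =>
    rw [List.range_succ]
    simp only [List.foldl_append, List.foldl_cons, List.foldl_nil]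
    rw [ih (by omega)]
    rw [colScan_eq]
    have hcol : ((M.map (fun row => (List.range k).foldl (fun r j =>
        if r.getD j 0 == -1 then r.set j (f j) else r) row)).map (fun row => row.getD k 0))
        = M.map (fun row => row.getD k 0) := by
      rw [List.map_map]
      exact List.map_congr_left (fun row _ => bfold_getD_high f k k row le_rfl)
    rw [hcol]
    by_cases hflag : (M.map (fun row => row.getD k 0)).any (· == -1) = true
    · rw [hflag, if_pos (by simp)]
      rw [List.map_map]
      refine List.map_congr_left (fun row hrow => ?_)
      simp only [Function.comp_apply]
      rw [bfold_getD_high f k k row le_rfl, hf k (by omega) hflag]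
    · rw [Bool.not_eq_true] at hflag
      rw [hflag]
      simp only [Bool.false_or]
      rw [if_neg (by simp)]
      refine List.map_congr_left (fun row hrow => ?_)
      have hnot : (((List.range k).foldl (fun r j =>
          if r.getD j 0 == -1 then r.set j (f j) else r) row).getD k 0 == -1) = false := by
        rw [bfold_getD_high f k k row le_rfl]
        by_contra hc
        rw [List.any_eq_false] at hflag
        exact hflag _ (List.mem_map_of_mem hrow) (by simpa using hc)
      rw [hnot]
      simp

-- ---- B-side characterisation ----

-- the best-update step of B's first pass, in isolation
def bupdF (row : List Int) (b : List Int) (j : Nat) : List Int :=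
  if row.getD j 0 == -1 then b
  else if b.getD j 0 < row.getD j 0 then b.set j (row.getD j 0) else b

-- the holes one row contributes
def rowHoles (n i : Nat) (row : List Int) : List (Nat × Nat) :=
  ((List.range n).filter (fun j => row.getD j 0 == -1)).map (fun j => (i, j))

-- all holes, rows numbered from i
def holesFrom (n : Nat) : Nat → List (List Int) → List (Nat × Nat)
  | _, [] => []
  | i, r :: rs => rowHoles n i r ++ holesFrom n (i + 1) rs

-- the best-only version of the first pass
def scanB (n : Nat) : List (List Int) → List Int → List Int
  | [], b => b
  | r :: rs, b => scanB n rs ((List.range n).foldl (bupdF r) b)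

-- B's patch step, in isolation
def patchF (best : List Int) (mat : List (List Int)) (q : Nat × Nat) : List (List Int) :=
  mat.set q.1 ((mat.getD q.1 []).set q.2 (best.getD q.2 0))

-- the inner scan splits into the best component and an appended hole list
theorem inner_split (i : Nat) (row : List Int) (js : List Nat) (b : List Int)
    (h : List (Nat × Nat)) :
    js.foldl (fun st j =>
      let v := row.getD j 0
      if v == -1 then (st.1, st.2 ++ [(i, j)])
      else if st.1.getD j 0 < v then (st.1.set j v, st.2)
      else st) (b, h)
    = (js.foldl (bupdF row) b,
       h ++ (js.filter (fun j => row.getD j 0 == -1)).map (fun j => (i, j))) := by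
  induction js generalizing b h with
  | nil => simp
  | cons j t ih =>
    simp only [List.foldl_cons, List.filter_cons]
    by_cases hv : row.getD j 0 = -1
    · have hb : (row.getD j 0 == -1) = true := by rw [hv]; rfl
      have h1 : bupdF row b j = b := by unfold bupdF; rw [hb, if_pos rfl]
      rw [hb, if_pos rfl, ih, h1]
      simp [List.append_assoc]
    · have hb : (row.getD j 0 == -1) = false := beq_eq_false_iff_ne.mpr hv
      rw [hb, if_neg (by simp)]
      by_cases hlt : b.getD j 0 < row.getD j 0
      · have h1 : bupdF row b j = b.set j (row.getD j 0) := by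
          unfold bupdF; rw [hb, if_neg (by simp), if_pos hlt]
        rw [if_pos hlt, ih, h1]
        simp
      · have h1 : bupdF row b j = b := by
          unfold bupdF; rw [hb, if_neg (by simp), if_neg hlt]
        rw [if_neg hlt, ih, h1]
        simp

theorem pvInner_eq (n i : Nat) (row : List Int) (b : List Int) (h : List (Nat × Nat)) :
    pvInner n i row (b, h) = ((List.range n).foldl (bupdF row) b, h ++ rowHoles n i row) := by
  unfold pvInner rowHoles
  exact inner_split i row (List.range n) b h

-- the whole first pass: best component = scanB, holes component = holesFrom
theorem scan_eq (n : Nat) (M : List (List Int)) (i : Nat) (b : List Int)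
    (h : List (Nat × Nat)) :
    pvScan n M i (b, h) = (scanB n M b, h ++ holesFrom n i M) := by
  induction M generalizing i b h with
  | nil => simp [pvScan, scanB, holesFrom]
  | cons r rs ih =>
    simp only [pvScan, scanB, holesFrom, pvInner_eq, ih]
    simp [List.append_assoc]

-- the best fold preserves length
theorem bupd_len (row : List Int) (js : List Nat) (b : List Int) :
    (js.foldl (bupdF row) b).length = b.length := by
  induction js generalizing b with
  | nil => rfl
  | cons j t ih =>
    simp only [List.foldl_cons]
    rw [ih]
    unfold bupdF
    split_ifs <;> simp

-- pointwise value of the best fold over range k (entries stay ≥ -1)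
theorem bupd_getD (row : List Int) (b : List Int)
    (hge : ∀ j, j < b.length → -1 ≤ b.getD j 0) (k : Nat) :
    ∀ j, j < b.length →
      ((List.range k).foldl (bupdF row) b).getD j 0
        = if j < k then max (b.getD j 0) (row.getD j 0) else b.getD j 0 := by
  induction k with
  | zero => intro j hj; simp
  | succ k ih =>
    intro j hj
    rw [List.range_succ, List.foldl_append]
    simp only [List.foldl_cons, List.foldl_nil]
    set Bk := (List.range k).foldl (bupdF row) b with hBk
    have hlen : Bk.length = b.length := bupd_len row _ b
    have hstep : ∀ j', j' < b.length → j' ≠ k →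
        (bupdF row Bk k).getD j' 0 = Bk.getD j' 0 := by
      intro j' hj' hne
      unfold bupdF
      split_ifs with c1 c2
      · rfl
      · rw [List.getD_eq_getElem?_getD, List.getElem?_set_ne (Ne.symm hne),
          ← List.getD_eq_getElem?_getD]
      · rfl
    by_cases hjk : j = k
    · subst hjk
      have hBkk : Bk.getD j 0 = b.getD j 0 := by rw [ih j hj]; simp
      unfold bupdF
      by_cases hva : row.getD j 0 = -1
      · rw [if_pos (show (row.getD j 0 == -1) = true by rw [hva]; rfl), hBkk, hva]
        have := hge j hj
        rw [if_pos (by omega), max_eq_left (by omega)]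
      · rw [if_neg (fun hcon => hva (eq_of_beq hcon))]
        by_cases hlt : Bk.getD j 0 < row.getD j 0
        · have hlt2 : b.getD j 0 < row.getD j 0 := by rw [← hBkk]; exact hlt
          rw [if_pos hlt, List.getD_eq_getElem?_getD,
            List.getElem?_set_self (by omega : j < Bk.length), Option.getD_some,
            if_pos (by omega), max_eq_right (le_of_lt hlt2)]
        · rw [if_neg hlt, hBkk]
          rw [hBkk] at hlt
          rw [if_pos (by omega), max_eq_left (by omega)]
    · by_cases hjlt : j < k
      · rw [hstep j hj hjk, ih j hj, if_pos hjlt, if_pos (by omega)]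
      · rw [hstep j hj hjk, ih j hj, if_neg hjlt, if_neg (by omega)]

-- the final best table is the -1-clamped column max
theorem scanB_getD (n : Nat) (M : List (List Int)) (b : List Int)
    (hge : ∀ j, j < b.length → -1 ≤ b.getD j 0) (hn : b.length = n) :
    ∀ j, j < n →
      (scanB n M b).getD j 0 = (M.map (fun r => r.getD j 0)).foldl max (b.getD j 0) := by
  induction M generalizing b with
  | nil => intro j hj; simp [scanB]
  | cons r rs ih =>
    intro j hj
    have hj' : j < b.length := by omega
    have hlen : ((List.range n).foldl (bupdF r) b).length = b.length := bupd_len r _ b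
    have hpt : ∀ j, j < b.length →
        ((List.range n).foldl (bupdF r) b).getD j 0
          = if j < n then max (b.getD j 0) (r.getD j 0) else b.getD j 0 :=
      bupd_getD r b hge n
    simp only [scanB, List.map_cons, List.foldl_cons]
    rw [ih ((List.range n).foldl (bupdF r) b)
        (fun j hjl => by
          rw [hpt j (by omega)]
          split_ifs with h
          · exact le_trans (hge j (by omega)) (le_max_left _ _)
          · exact hge j (by omega))
        (by omega) j hj]
    rw [hpt j hj']
    simp [hj]

-- setting / reading exactly past a prefix
theorem set_append_len (pre : List (List Int)) (r : List Int) (rs : List (List Int))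
    (x : List Int) : (pre ++ r :: rs).set pre.length x = pre ++ x :: rs := by
  induction pre with
  | nil => rfl
  | cons p t ih => simp

theorem getD_append_len (pre : List (List Int)) (r : List Int) (rs : List (List Int)) :
    (pre ++ r :: rs).getD pre.length [] = r := by
  induction pre with
  | nil => rfl
  | cons p t ih => simp

-- patching all the holes of one row rewrites exactly that row
theorem patch_one (best : List Int) (js : List Nat) (pre : List (List Int)) (r : List Int)
    (rs : List (List Int)) :
    (js.map (fun j => (pre.length, j))).foldl (patchF best) (pre ++ r :: rs)
      = pre ++ (js.foldl (fun row j => row.set j (best.getD j 0)) r) :: rs := by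
  induction js generalizing r with
  | nil => rfl
  | cons j t ih =>
    simp only [List.map_cons, List.foldl_cons]
    have : patchF best (pre ++ r :: rs) (pre.length, j)
        = pre ++ (r.set j (best.getD j 0)) :: rs := by
      unfold patchF
      rw [getD_append_len, set_append_len]
    rw [this, ih]

-- patching the whole worklist rewrites each row independently
theorem patch_rows (best : List Int) (n : Nat) :
    ∀ (Ms pre : List (List Int)),
      (holesFrom n pre.length Ms).foldl (patchF best) (pre ++ Ms)
        = pre ++ Ms.map (fun r =>
            ((List.range n).filter (fun j => r.getD j 0 == -1)).foldl
              (fun row j => row.set j (best.getD j 0)) r) := by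
  intro Ms
  induction Ms with
  | nil => intro pre; simp [holesFrom]
  | cons r rs ih =>
    intro pre
    simp only [holesFrom, List.foldl_append, List.map_cons]
    rw [show rowHoles n pre.length r
        = (((List.range n).filter (fun j => r.getD j 0 == -1)).map
            (fun j => (pre.length, j))) from rfl,
      patch_one]
    have hpre : (pre ++ [((List.range n).filter (fun j => r.getD j 0 == -1)).foldl
        (fun row j => row.set j (best.getD j 0)) r]).length = pre.length + 1 := by simp
    calc (holesFrom n (pre.length + 1) rs).foldl (patchF best)
          (pre ++ _ :: rs)
        = (holesFrom n (pre ++ [_]).length rs).foldl (patchF best) ((pre ++ [_]) ++ rs) := by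
          rw [hpre]; simp
      _ = (pre ++ [_]) ++ rs.map _ := ih (pre ++ [_])
      _ = pre ++ _ :: rs.map _ := by simp

-- the conditional rewrite over range n equals the unconditional rewrite over the filtered holes
theorem filter_fold_eq (f : Nat → Int) (n : Nat) (r : List Int) :
    (List.range n).foldl (fun r j => if r.getD j 0 == -1 then r.set j (f j) else r) r
      = ((List.range n).filter (fun j => r.getD j 0 == -1)).foldl
          (fun row j => row.set j (f j)) r := by
  induction n with
  | zero => rfl
  | succ k ih =>
    rw [List.range_succ, List.foldl_append, List.filter_append, List.foldl_append]
    simp only [List.foldl_cons, List.foldl_nil, List.filter_cons, List.filter_nil]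
    rw [bfold_getD_high f k k r le_rfl, ← ih]
    by_cases hv : r.getD k 0 = -1
    · have hb : (r.getD k 0 == -1) = true := by rw [hv]; rfl
      rw [hb, if_pos rfl, if_pos rfl]
      simp
    · have hb : (r.getD k 0 == -1) = false := beq_eq_false_iff_ne.mpr hv
      rw [hb, if_neg (by simp), if_neg (by simp)]
      simp

-- ===== VERDICT (by name: the statement is the Claim_ definition above) =====
theorem modifiedMatrix_spec : Claim_equal_modifiedMatrix := by
  intro matrix _ _
  unfold Spec_modifiedMatrix modifiedMatrix modifiedMatrix_alt
  simp only []
  set n := (matrix.headD []).length with hn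
  rw [scan_eq n matrix 0 (List.replicate n (-1)) []]
  set best := scanB n matrix (List.replicate n (-1)) with hbest
  have hrepl : ∀ j, j < n → ((List.replicate n (-1 : Int)).getD j 0) = -1 := by
    intro j hj; simp [List.getD_eq_getElem?_getD, hj]
  have hbestv : ∀ j, j < n →
      best.getD j 0 = (matrix.map (fun r => r.getD j 0)).foldl max (-1) := by
    intro j hj
    rw [hbest, scanB_getD n matrix (List.replicate n (-1))
      (fun j hjl => by rw [hrepl j (by simpa using hjl)])
      (by simp) j hj, hrepl j hj]
  have hA := main_inv matrix n (fun j => best.getD j 0)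
    (fun j hj _ => (hbestv j hj).symm) n le_rfl
  have hB := patch_rows best n matrix []
  simp only [List.nil_append, List.length_nil] at hB
  rw [hA, show ([] : List (Nat × Nat)) ++ holesFrom n 0 matrix = holesFrom n 0 matrix
    from rfl]
  rw [show (fun (mat : List (List Int)) (q : Nat × Nat) =>
      mat.set q.1 ((mat.getD q.1 []).set q.2 (best.getD q.2 0))) = patchF best from rfl]
  rw [hB]
  exact List.map_congr_left (fun row _ => filter_fold_eq (fun j => best.getD j 0) n row)
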